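-- pv_equiv track=rewrite | github.com/LeanA23/Complejidad-TPI | camionerosConDinamica.py | armarMatriz
-- ===== SOURCE A (Python) =====
-- def armarMatriz(n, distancias):
--     longi = len(distancias) + 1
--     matriz = [[9999] * (longi) for i in range(longi)]
--     for i in range(longi):
--         acum = 0
--         aux=longi
--         for j in range(i, longi - 1):
--             acum += distancias[j]
--             if acum <= n:
--                 matriz[i][j + 1] = aux
--             aux-=1
--
--     return matriz
-- ===== SOURCE B (Python) =====
-- def armarMatriz(n, distancias):
--     longi = len(distancias) + 1
--     matriz = [[9999] * longi for _ in range(longi)]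
--     w = [0] * longi                      # w[i] = sum(distancias[i:i+d]) for the current diagonal d
--     for d in range(1, longi):            # diagonal-major: all cells (i, i+d) share the value longi-d+1
--         val = longi - d + 1
--         for i in range(longi - d):
--             w[i] += distancias[i + d - 1]
--             if w[i] <= n:
--                 matriz[i][i + d] = val
--     return matriz
-- ===== Notes on version B (the rewrite author's own statement) =====
-- stated objective: alternative
-- what changed: B traverses the matrix diagonal by diagonal (window length d), maintaining all sliding-window sums w[i]=sum(distancias[i:i+d]) by extending each with one element per diagonal, and writes the constant value longi-d+1 along each diagonal, instead of A's row-major pass with a per-row running accumulator and decrementing counter.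
import Mathlib
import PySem

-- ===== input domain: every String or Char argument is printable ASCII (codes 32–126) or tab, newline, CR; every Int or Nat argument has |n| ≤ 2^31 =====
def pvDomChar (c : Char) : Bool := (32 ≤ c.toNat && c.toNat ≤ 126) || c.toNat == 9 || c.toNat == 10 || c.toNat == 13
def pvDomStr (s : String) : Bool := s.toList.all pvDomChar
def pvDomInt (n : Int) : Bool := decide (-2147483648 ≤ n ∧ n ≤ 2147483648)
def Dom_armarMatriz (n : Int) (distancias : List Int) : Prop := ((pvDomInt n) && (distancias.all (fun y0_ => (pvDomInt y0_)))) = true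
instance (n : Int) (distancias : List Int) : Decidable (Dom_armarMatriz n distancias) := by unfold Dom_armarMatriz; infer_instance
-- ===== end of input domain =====

-- B fills the matrix diagonal by diagonal, extending sliding-window sums by one element
-- per diagonal, instead of A's row-major pass with a running accumulator and counter
-- (objective: alternative traversal, same cost).

-- ===== PORT A =====
-- state: (row, acum, aux); distancias[j] read via getD: j ranges over range(i, longi-1), always in bounds
def stepA (n : Int) (ds : List Int) (st : List Int × Int × Int) (j : Nat) : List Int × Int × Int :=
  let acum := st.2.1 + ds.getD j 0
  (if acum ≤ n then st.1.set (j+1) st.2.2 else st.1, acum, st.2.2 - 1)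

def armarMatriz (n : Int) (distancias : List Int) : List (List Int) :=
  let longi := distancias.length + 1
  (List.range longi).map (fun i =>
    (List.foldl (stepA n distancias)
      (List.replicate longi (9999 : Int), (0 : Int), (longi : Int))
      (List.range' i (longi - 1 - i))).1)

-- ===== PORT B =====
-- inner body for diagonal d: w[i] += distancias[i+d-1]; if w[i] <= n: matriz[i][i+d] = longi-d+1
-- (distancias[i+d-1] read via getD: i < longi-d keeps it in bounds)
def innerB (n : Int) (ds : List Int) (d : Nat) (st : List (List Int) × List Int) (i : Nat) :
    List (List Int) × List Int :=
  let wi := st.2.getD i 0 + ds.getD (i + d - 1) 0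
  (if wi ≤ n
   then st.1.modify i (fun row => row.set (i + d) (((ds.length + 1 : Nat) : Int) - (d : Int) + 1))
   else st.1,
   st.2.set i wi)

def armarMatriz_alt (n : Int) (distancias : List Int) : List (List Int) :=
  let longi := distancias.length + 1
  ((List.range' 1 (longi - 1)).foldl
     (fun st d => (List.range (longi - d)).foldl (innerB n distancias d) st)
     (List.replicate longi (List.replicate longi (9999 : Int)),
      List.replicate longi (0 : Int))).1

-- ===== PRECONDITION & SPEC =====
def Spec_armarMatriz (n : Int) (distancias : List Int) (out : List (List Int)) : Prop := out = armarMatriz_alt n distancias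
instance (n : Int) (distancias : List Int) (out : List (List Int)) : Decidable (Spec_armarMatriz n distancias out) := by unfold Spec_armarMatriz; infer_instance

-- ===== CLAIM (what is proved, stated in full; the proofs are below) =====
def Claim_equal_armarMatriz : Prop := ∀ (n : Int) (distancias : List Int), Dom_armarMatriz n distancias → Spec_armarMatriz n distancias (armarMatriz n distancias)

-- ===== LEMMAS AND PROOFS =====

-- ---- A side: reshape the inner loop into conditional sets, then read it per cell ----

def setStep (n : Int) (ds : List Int) (i₀ : Nat) (r : List Int) (k : Nat) : List Int :=
  if (ds.take k).sum - (ds.take i₀).sum ≤ n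
  then r.set k (((ds.length + 1 : Nat) : Int) - ((k : Int) - (i₀ : Int)) + 1)
  else r

lemma rowLoop (n : Int) (ds : List Int) (i₀ : Nat) :
    ∀ (m j : Nat) (row : List Int), j + m ≤ ds.length →
    (List.foldl (stepA n ds)
      (row, (ds.take j).sum - (ds.take i₀).sum,
        ((ds.length + 1 : Nat) : Int) - ((j : Int) - (i₀ : Int)))
      (List.range' j m)).1
    = List.foldl (setStep n ds i₀) row (List.range' (j+1) m) := by
  intro m
  induction m with
  | zero => intro j row h; simp [List.range']
  | succ m ih =>
    intro j row h
    have hj : j < ds.length := by omega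
    rw [List.range'_succ, List.range'_succ, List.foldl_cons, List.foldl_cons]
    have hsum : (ds.take j).sum - (ds.take i₀).sum + ds.getD j 0
        = (ds.take (j+1)).sum - (ds.take i₀).sum := by
      rw [List.getD_eq_getElem ds 0 hj, List.sum_take_succ ds j hj]; omega
    have hstep : stepA n ds (row, (ds.take j).sum - (ds.take i₀).sum,
          ((ds.length + 1 : Nat) : Int) - ((j : Int) - (i₀ : Int))) j
        = (setStep n ds i₀ row (j+1),
           (ds.take (j+1)).sum - (ds.take i₀).sum,
           ((ds.length + 1 : Nat) : Int) - (((j+1 : Nat) : Int) - (i₀ : Int))) := by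
      simp only [stepA, setStep, hsum]
      refine Prod.ext ?_ (Prod.ext rfl ?_)
      · split
        · congr 1; push_cast; ring
        · rfl
      · simp only []; push_cast; omega
    rw [hstep, ih (j+1) _ (by omega)]

lemma foldl_setStep_length (n : Int) (ds : List Int) (i₀ : Nat) :
    ∀ (l : List Nat) (row : List Int),
    (List.foldl (setStep n ds i₀) row l).length = row.length := by
  intro l
  induction l with
  | nil => intro row; rfl
  | cons a l ih =>
    intro row
    rw [List.foldl_cons, ih]
    simp only [setStep]; split <;> simp

lemma foldl_setStep_getD (n : Int) (ds : List Int) (i₀ : Nat) :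
    ∀ (m a : Nat) (row : List Int) (k : Nat), k < row.length →
    (List.foldl (setStep n ds i₀) row (List.range' a m)).getD k 0
    = if a ≤ k ∧ k < a + m ∧ (ds.take k).sum - (ds.take i₀).sum ≤ n
      then ((ds.length + 1 : Nat) : Int) - ((k : Int) - (i₀ : Int)) + 1
      else row.getD k 0 := by
  intro m
  induction m with
  | zero =>
    intro a row k hk
    simp only [List.range', List.foldl_nil]
    have : ¬ (a ≤ k ∧ k < a + 0 ∧ (ds.take k).sum - (ds.take i₀).sum ≤ n) := by omega
    rw [if_neg this]
  | succ m ih =>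
    intro a row k hk
    rw [List.range'_succ, List.foldl_cons]
    rw [ih (a+1) _ k (by simp only [setStep]; split <;> simp [hk])]
    by_cases hka : k = a
    · subst hka
      have h1 : ¬ (k + 1 ≤ k ∧ k < k + 1 + m ∧ (ds.take k).sum - (ds.take i₀).sum ≤ n) := by omega
      rw [if_neg h1]
      simp only [setStep]
      split
      · rename_i hc
        rw [if_pos ⟨le_refl k, by omega, hc⟩,
            List.getD_eq_getElem _ 0 (by rw [List.length_set]; exact hk), List.getElem_set_self]
      · rename_i hc
        rw [if_neg (by omega)]
    · have hset : (setStep n ds i₀ row a).getD k 0 = row.getD k 0 := by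
        simp only [setStep]
        split
        · rw [List.getD_eq_getElem _ 0 (by rw [List.length_set]; exact hk),
             List.getD_eq_getElem _ 0 hk, List.getElem_set_ne (by omega)]
        · rfl
      rw [hset]
      by_cases hreg : a + 1 ≤ k ∧ k < a + 1 + m ∧ (ds.take k).sum - (ds.take i₀).sum ≤ n
      · rw [if_pos hreg, if_pos ⟨by omega, by omega, hreg.2.2⟩]
      · rw [if_neg hreg]
        rw [if_neg (by intro h; exact hreg ⟨by omega, by omega, h.2.2⟩)]

-- ---- the window sums of A and B are the same quantity ----

lemma window_sum_eq (ds : List Int) (i k : Nat) (_hik : i ≤ k) (_hk : k ≤ ds.length) :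
    ((ds.drop i).take (k - i)).sum = (ds.take k).sum - (ds.take i).sum := by
  have : ds.take k = ds.take i ++ (ds.drop i).take (k - i) := by
    rw [← List.take_add]
    congr 1
    omega
  have hs := congrArg List.sum this
  rw [List.sum_append] at hs
  omega

-- ---- B side: one diagonal of the inner loop, read per cell ----

lemma innerLoop (n : Int) (ds : List Int) (d : Nat) (hd : 1 ≤ d) :
    ∀ (t s : Nat) (M : List (List Int)) (W : List Int),
      M.length = ds.length + 1 → (∀ r ∈ M, r.length = ds.length + 1) →
      W.length = ds.length + 1 → s + t ≤ ds.length + 1 - d →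
      (List.foldl (innerB n ds d) (M, W) (List.range' s t)).1.length = ds.length + 1 ∧
      (∀ r ∈ (List.foldl (innerB n ds d) (M, W) (List.range' s t)).1, r.length = ds.length + 1) ∧
      (List.foldl (innerB n ds d) (M, W) (List.range' s t)).2.length = ds.length + 1 ∧
      (∀ i, i < ds.length + 1 →
        (List.foldl (innerB n ds d) (M, W) (List.range' s t)).2.getD i 0
          = if s ≤ i ∧ i < s + t then W.getD i 0 + ds.getD (i + d - 1) 0 else W.getD i 0) ∧
      (∀ i k, i < ds.length + 1 → k < ds.length + 1 →
        (((List.foldl (innerB n ds d) (M, W) (List.range' s t)).1.getD i []).getD k 0)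
          = if s ≤ i ∧ i < s + t ∧ k = i + d ∧ W.getD i 0 + ds.getD (i + d - 1) 0 ≤ n
            then ((ds.length + 1 : Nat) : Int) - (d : Int) + 1
            else ((M.getD i []).getD k 0)) := by
  intro t
  induction t with
  | zero =>
    intro s M W hM hMr hW hst
    refine ⟨by simpa using hM, by simpa using hMr, by simpa using hW, ?_, ?_⟩
    · intro i hi; simp only [List.range', List.foldl_nil]
      rw [if_neg (by omega)]
    · intro i k hi hk; simp only [List.range', List.foldl_nil]
      rw [if_neg (by intro h; omega)]
  | succ t ih =>
    intro s M W hM hMr hW hst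
    have hsL : s < ds.length + 1 := by omega
    have hsdL : s + d < ds.length + 1 := by omega
    rw [List.range'_succ, List.foldl_cons]
    -- the single step at index s
    set wi := W.getD s 0 + ds.getD (s + d - 1) 0 with hwi
    set M₁ := if wi ≤ n
      then M.modify s (fun row => row.set (s + d) (((ds.length + 1 : Nat) : Int) - (d : Int) + 1))
      else M with hM₁
    have hstep : innerB n ds d (M, W) s = (M₁, W.set s wi) := rfl
    have hM₁len : M₁.length = ds.length + 1 := by
      rw [hM₁]; split <;> simp [hM]
    have hM₁rows : ∀ r ∈ M₁, r.length = ds.length + 1 := by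
      intro r hr
      rw [hM₁] at hr
      split at hr
      · obtain ⟨j, hj, rfl⟩ := List.mem_iff_getElem.mp hr
        rw [List.length_modify] at hj
        rw [List.getElem_modify]
        split
        · rename_i hjs; subst hjs
          rw [List.length_set]; exact hMr _ (List.getElem_mem hj)
        · exact hMr _ (List.getElem_mem hj)
      · exact hMr r hr
    have hW₁len : (W.set s wi).length = ds.length + 1 := by simp [hW]
    have hW₁ : ∀ i, i < ds.length + 1 →
        (W.set s wi).getD i 0 = if i = s then wi else W.getD i 0 := by
      intro i hi
      by_cases his : i = s
      · subst his
        rw [if_pos rfl, List.getD_eq_getElem _ 0 (by omega : i < (W.set i wi).length),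
            List.getElem_set_self]
      · rw [if_neg his, List.getD_eq_getElem _ 0 (by omega : i < (W.set s wi).length),
            List.getD_eq_getElem _ 0 (by omega), List.getElem_set_ne (by omega)]
    have hgcell : ∀ i k, i < ds.length + 1 → k < ds.length + 1 →
        (M₁.getD i []).getD k 0
          = if i = s ∧ k = s + d ∧ wi ≤ n
            then ((ds.length + 1 : Nat) : Int) - (d : Int) + 1
            else (M.getD i []).getD k 0 := by
      intro i k hi hk
      rw [hM₁]
      by_cases hc : wi ≤ n
      · rw [if_pos hc]
        have hiM : i < M.length := by omega
        rw [List.getD_eq_getElem _ [] (by simpa using hiM), List.getElem_modify]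
        by_cases his : s = i
        · subst his
          rw [if_pos rfl]
          have hrow : (M[s]'hiM).length = ds.length + 1 := hMr _ (List.getElem_mem hiM)
          by_cases hks : k = s + d
          · subst hks
            rw [List.getD_eq_getElem _ 0 (by rw [List.length_set, hrow]; exact hk),
                List.getElem_set_self, if_pos ⟨rfl, rfl, hc⟩]
          · rw [if_neg (fun h => hks h.2.1),
                List.getD_eq_getElem _ 0 (by rw [List.length_set, hrow]; exact hk),
                List.getElem_set_ne (by omega), List.getD_eq_getElem _ [] hiM,
                List.getD_eq_getElem _ 0 (by rw [hrow]; exact hk)]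
        · rw [if_neg his, if_neg (fun h => his h.1.symm), List.getD_eq_getElem _ [] hiM]
      · rw [if_neg hc, if_neg (fun h => hc h.2.2)]
    -- apply the induction hypothesis to the state after the step
    obtain ⟨ihL, ihR, ihW, ihw, ihm⟩ :=
      ih (s+1) M₁ (W.set s wi) hM₁len hM₁rows hW₁len (by omega)
    rw [hstep]
    refine ⟨ihL, ihR, ihW, ?_, ?_⟩
    · intro i hi
      rw [ihw i hi]
      by_cases his : i = s
      · subst his
        rw [if_neg (by omega), hW₁ i hi, if_pos rfl, if_pos (by omega), hwi]
      · rw [hW₁ i hi, if_neg his]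
        by_cases hreg : s + 1 ≤ i ∧ i < s + 1 + t
        · rw [if_pos hreg, if_pos (by omega)]
        · rw [if_neg hreg, if_neg (by omega)]
    · intro i k hi hk
      rw [ihm i k hi hk]
      by_cases his : i = s
      · subst his
        rw [if_neg (by omega), hgcell i k hi hk]
        by_cases hks : k = i + d ∧ wi ≤ n
        · rw [if_pos ⟨rfl, hks.1, hks.2⟩, if_pos ⟨by omega, by omega, hks.1, by rw [← hwi]; exact hks.2⟩]
        · rw [if_neg (by intro h; exact hks ⟨h.2.1, h.2.2⟩),
              if_neg (by intro h; exact hks ⟨h.2.2.1, by rw [hwi]; exact h.2.2.2⟩)]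
      · have hWi : (W.set s wi).getD i 0 = W.getD i 0 := by
          rw [hW₁ i hi, if_neg his]
        have hMold : (M₁.getD i []).getD k 0 = (M.getD i []).getD k 0 := by
          rw [hgcell i k hi hk, if_neg (fun h => his h.1)]
        rw [hWi, hMold]
        by_cases hreg : s + 1 ≤ i ∧ i < s + 1 + t ∧ k = i + d ∧ W.getD i 0 + ds.getD (i + d - 1) 0 ≤ n
        · rw [if_pos hreg, if_pos ⟨by omega, by omega, hreg.2.2⟩]
        · rw [if_neg hreg, if_neg (fun h => hreg ⟨by omega, by omega, h.2.2⟩)]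

-- ---- B side: the outer loop over diagonals ----

lemma outerLoop (n : Int) (ds : List Int) :
    ∀ (d : Nat), d ≤ ds.length →
      ((List.range' 1 d).foldl
         (fun st e => (List.range (ds.length + 1 - e)).foldl (innerB n ds e) st)
         (List.replicate (ds.length + 1) (List.replicate (ds.length + 1) (9999 : Int)),
          List.replicate (ds.length + 1) (0 : Int))).1.length = ds.length + 1 ∧
      (∀ r ∈ ((List.range' 1 d).foldl
         (fun st e => (List.range (ds.length + 1 - e)).foldl (innerB n ds e) st)
         (List.replicate (ds.length + 1) (List.replicate (ds.length + 1) (9999 : Int)),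
          List.replicate (ds.length + 1) (0 : Int))).1, r.length = ds.length + 1) ∧
      ((List.range' 1 d).foldl
         (fun st e => (List.range (ds.length + 1 - e)).foldl (innerB n ds e) st)
         (List.replicate (ds.length + 1) (List.replicate (ds.length + 1) (9999 : Int)),
          List.replicate (ds.length + 1) (0 : Int))).2.length = ds.length + 1 ∧
      (∀ i, i < ds.length + 1 →
        ((List.range' 1 d).foldl
           (fun st e => (List.range (ds.length + 1 - e)).foldl (innerB n ds e) st)
           (List.replicate (ds.length + 1) (List.replicate (ds.length + 1) (9999 : Int)),
            List.replicate (ds.length + 1) (0 : Int))).2.getD i 0 = ((ds.drop i).take d).sum) ∧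
      (∀ i k, i < ds.length + 1 → k < ds.length + 1 →
        ((((List.range' 1 d).foldl
            (fun st e => (List.range (ds.length + 1 - e)).foldl (innerB n ds e) st)
            (List.replicate (ds.length + 1) (List.replicate (ds.length + 1) (9999 : Int)),
             List.replicate (ds.length + 1) (0 : Int))).1.getD i []).getD k 0)
          = if i < k ∧ k ≤ i + d ∧ ((ds.drop i).take (k - i)).sum ≤ n
            then ((ds.length + 1 : Nat) : Int) - ((k : Int) - (i : Int)) + 1
            else 9999) := by
  intro d
  induction d with
  | zero =>
    intro _
    refine ⟨by simp, by intro r hr; exact List.eq_of_mem_replicate hr ▸ (by simp), by simp, ?_, ?_⟩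
    · intro i hi; simp
    · intro i k hi hk
      rw [if_neg (by omega)]
      simp only [List.range', List.foldl_nil]
      rw [List.getD_eq_getElem _ [] (by simpa using hi), List.getElem_replicate,
          List.getD_eq_getElem _ 0 (by simpa using hk), List.getElem_replicate]
  | succ d ihd =>
    intro hdl
    obtain ⟨pL, pR, pW, pw, pm⟩ := ihd (by omega)
    rw [List.range'_1_concat, List.foldl_append, List.foldl_cons, List.foldl_nil]
    obtain ⟨qL, qR, qW, qw, qm⟩ :=
      innerLoop n ds (1 + d) (by omega) (ds.length + 1 - (1 + d)) 0 _ _ pL pR pW (by omega)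
    rw [List.range_eq_range']
    refine ⟨qL, qR, qW, ?_, ?_⟩
    · intro i hi
      rw [qw i hi]
      by_cases hreg : i < ds.length + 1 - (1 + d)
      · rw [if_pos (by omega), pw i hi]
        have hidx : i + (1 + d) - 1 = i + d := by omega
        have hlt : i + d < ds.length := by omega
        have hdd : d < (ds.drop i).length := by rw [List.length_drop]; omega
        rw [hidx, List.getD_eq_getElem ds 0 hlt,
            List.sum_take_succ (ds.drop i) d hdd, List.getElem_drop]
      · rw [if_neg (by omega), pw i hi]
        have h1 : (ds.drop i).length ≤ d := by rw [List.length_drop]; omega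
        rw [List.take_of_length_le h1, List.take_of_length_le (by omega)]
    · intro i k hi hk
      rw [qm i k hi hk]
      by_cases hnew : k = i + (1 + d) ∧ ((ds.drop i).take (k - i)).sum ≤ n
      · -- the freshly written diagonal cell
        have hik : i < ds.length + 1 - (1 + d) := by omega
        have hsum : ((List.range' 1 d).foldl
              (fun st e => (List.range (ds.length + 1 - e)).foldl (innerB n ds e) st)
              (List.replicate (ds.length + 1) (List.replicate (ds.length + 1) (9999 : Int)),
               List.replicate (ds.length + 1) (0 : Int))).2.getD i 0 + ds.getD (i + (1 + d) - 1) 0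
            = ((ds.drop i).take (k - i)).sum := by
          rw [pw i hi]
          have hidx : i + (1 + d) - 1 = i + d := by omega
          have hlt : i + d < ds.length := by omega
          have hdd : d < (ds.drop i).length := by rw [List.length_drop]; omega
          have hki : k - i = d + 1 := by omega
          rw [hidx, hki, List.getD_eq_getElem ds 0 hlt,
              List.sum_take_succ (ds.drop i) d hdd, List.getElem_drop]
        rw [if_pos ⟨by omega, by omega, hnew.1, by rw [hsum]; exact hnew.2⟩,
            if_pos ⟨by omega, by omega, hnew.2⟩]
        congr 1
        have : (k : Int) - (i : Int) = ((1 + d : Nat) : Int) := by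
          have := hnew.1; subst this; push_cast; ring
        rw [this]
      · -- unchanged cell: fall through to the previous diagonals' description
        have hnotq : ¬ (0 ≤ i ∧ i < 0 + (ds.length + 1 - (1 + d)) ∧ k = i + (1 + d) ∧
            ((List.range' 1 d).foldl
              (fun st e => (List.range (ds.length + 1 - e)).foldl (innerB n ds e) st)
              (List.replicate (ds.length + 1) (List.replicate (ds.length + 1) (9999 : Int)),
               List.replicate (ds.length + 1) (0 : Int))).2.getD i 0 + ds.getD (i + (1 + d) - 1) 0 ≤ n) := by
          intro h
          apply hnew
          refine ⟨h.2.2.1, ?_⟩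
          have hik : i < ds.length + 1 - (1 + d) := by omega
          have hidx : i + (1 + d) - 1 = i + d := by omega
          have hlt : i + d < ds.length := by omega
          have hdd : d < (ds.drop i).length := by rw [List.length_drop]; omega
          have hki : k - i = d + 1 := by omega
          have := h.2.2.2
          rw [pw i hi, hidx, List.getD_eq_getElem ds 0 hlt] at this
          rw [hki, List.sum_take_succ (ds.drop i) d hdd, List.getElem_drop]
          omega
        rw [if_neg hnotq, pm i k hi hk]
        by_cases hold : i < k ∧ k ≤ i + d ∧ ((ds.drop i).take (k - i)).sum ≤ n
        · rw [if_pos hold, if_pos ⟨hold.1, by omega, hold.2.2⟩]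
        · have hne : ¬ (i < k ∧ k ≤ i + (d + 1) ∧ ((ds.drop i).take (k - i)).sum ≤ n) := by
            intro h
            by_cases hkd : k ≤ i + d
            · exact hold ⟨h.1, hkd, h.2.2⟩
            · -- k = i + (1 + d): this is the cell hnew excludes
              exact hnew ⟨by omega, h.2.2⟩
          rw [if_neg hold, if_neg hne]

-- ===== VERDICT =====

theorem armarMatriz_spec : Claim_equal_armarMatriz := by
  intro n ds _
  unfold Spec_armarMatriz armarMatriz armarMatriz_alt
  simp only []
  obtain ⟨bL, bR, _, _, bm⟩ := outerLoop n ds ds.length (le_refl _)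
  have hlen1 : ds.length + 1 - 1 = ds.length := by omega
  simp only [hlen1]
  apply List.ext_getElem
  · rw [List.length_map, List.length_range, bL]
  · intro i hiA hiB
    have hi : i < ds.length + 1 := by simpa [bL] using hiB
    rw [List.getElem_map, List.getElem_range]
    -- A's row i, reshaped and read per cell
    have h0 : (0 : Int) = (ds.take i).sum - (ds.take i).sum := by omega
    have h1 : ((ds.length + 1 : Nat) : Int)
        = ((ds.length + 1 : Nat) : Int) - ((i : Int) - (i : Int)) := by ring
    have hr := rowLoop n ds i (ds.length - i) i (List.replicate (ds.length + 1) (9999 : Int)) (by omega)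
    rw [← h0, ← h1] at hr
    rw [hr]
    apply List.ext_getElem
    · rw [foldl_setStep_length, List.length_replicate, bR _ (List.getElem_mem hiB)]
    · intro k hkA hkB
      have hk : k < ds.length + 1 := by
        simpa [foldl_setStep_length, List.length_replicate] using hkA
      rw [← List.getD_eq_getElem _ 0 hkA, ← List.getD_eq_getElem _ 0 hkB]
      rw [foldl_setStep_getD n ds i (ds.length - i) (i+1) _ k (by simp [hk])]
      have hgd : (((List.range' 1 ds.length).foldl
            (fun st e => (List.range (ds.length + 1 - e)).foldl (innerB n ds e) st)
            (List.replicate (ds.length + 1) (List.replicate (ds.length + 1) (9999 : Int)),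
             List.replicate (ds.length + 1) (0 : Int))).1.getD i []).getD k 0
          = if i < k ∧ k ≤ i + ds.length ∧ ((ds.drop i).take (k - i)).sum ≤ n
            then ((ds.length + 1 : Nat) : Int) - ((k : Int) - (i : Int)) + 1
            else 9999 := bm i k hi hk
      rw [List.getD_eq_getElem _ [] hiB] at hgd
      rw [hgd]
      by_cases hik : i < k
      · rw [window_sum_eq ds i k (by omega) (by omega)]
        by_cases hc : (ds.take k).sum - (ds.take i).sum ≤ n
        · rw [if_pos ⟨by omega, by omega, hc⟩, if_pos ⟨hik, by omega, hc⟩]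
        · rw [if_neg (by intro h; exact hc h.2.2), if_neg (by intro h; exact hc h.2.2)]
          simp [hk]
      · rw [if_neg (by omega), if_neg (by intro h; exact hik h.1)]
        simp [hk]
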